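-- pv_equiv track=rewrite | github.com/Bobcatsoap/jy-server | cell/RoomType6InitiativeCardSplit.py | find_san_zhang
-- ===== SOURCE A (Python) =====
-- def find_san_zhang(cards):
--     san_zhang_s = []
--     checked = []
--     for c in cards:
--         if cards.count(c) == 3 and c not in checked:
--             san_zhang_s.append([c, c, c])
--             checked.append(c)
--
--     return san_zhang_s
-- ===== SOURCE B (Python) =====
-- def find_san_zhang(cards):
--     cnt = {}
--     for c in cards:
--         cnt[c] = cnt.get(c, 0) + 1
--     return [[c, c, c] for c, v in cnt.items() if v == 3]
-- ===== Notes on version B (the rewrite author's own statement) =====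
-- stated objective: faster
-- what changed: Replaces A's per-element cards.count scan plus a seen-list with a single frequency-dict pass followed by one pass over the distinct keys in insertion order.
import Mathlib
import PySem

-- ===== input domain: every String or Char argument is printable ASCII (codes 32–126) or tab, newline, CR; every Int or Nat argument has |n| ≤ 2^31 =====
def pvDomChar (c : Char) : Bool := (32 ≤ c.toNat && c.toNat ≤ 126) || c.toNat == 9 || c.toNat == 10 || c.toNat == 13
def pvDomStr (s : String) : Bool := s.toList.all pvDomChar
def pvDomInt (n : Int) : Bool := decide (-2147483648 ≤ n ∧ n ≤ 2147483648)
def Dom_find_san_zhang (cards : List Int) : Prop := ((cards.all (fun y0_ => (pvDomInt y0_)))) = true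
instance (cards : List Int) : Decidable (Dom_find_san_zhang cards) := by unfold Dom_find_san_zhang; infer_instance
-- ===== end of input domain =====

-- B replaces A's per-element cards.count rescans plus a seen-list with a one-pass
-- frequency dict followed by one pass over its distinct keys (objective: faster).

-- ===== PORT A =====
def find_san_zhang (cards : List Int) : List (List Int) :=
  (cards.foldl
    (fun (st : List (List Int) × List Int) c =>
      if cards.count c == 3 && !(st.2.contains c)
      then (st.1 ++ [[c, c, c]], st.2 ++ [c])
      else st)
    ([], [])).1

-- ===== PORT B =====
def find_san_zhang_alt (cards : List Int) : List (List Int) :=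
  let cnt : PySem.Dict Int Int :=
    cards.foldl (fun d c => d.insert c (d.getD c 0 + 1)) PySem.Dict.empty
  cnt.items.filterMap (fun p => if p.2 == 3 then some [p.1, p.1, p.1] else none)

-- ===== PRECONDITION & SPEC =====
def Spec_find_san_zhang (cards : List Int) (out : List (List Int)) : Prop := out = find_san_zhang_alt cards
instance (cards : List Int) (out : List (List Int)) : Decidable (Spec_find_san_zhang cards out) := by unfold Spec_find_san_zhang; infer_instance

-- ===== CLAIM (what is proved, stated in full; the proofs are below) =====
def Claim_equal_find_san_zhang : Prop := ∀ (cards : List Int), Dom_find_san_zhang cards → Spec_find_san_zhang cards (find_san_zhang cards)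

-- ===== LEMMAS AND PROOFS =====

-- The value emitted for a distinct card c (common characterisation of both sides).
def pvSel (all : List Int) (c : Int) : Option (List Int) :=
  if all.count c == 3 then some [c, c, c] else none

lemma pv_filter_ofList_cons (c : Int) (rest seen : List Int) :
    ((PySem.Set.ofList (c :: rest)).filter (fun y => !seen.contains y))
    = (if seen.contains c then ([] : List Int) else [c])
      ++ (PySem.Set.ofList rest).filter (fun y => !((c :: seen).contains y)) := by
  rw [PySem.Set.ofList_cons]
  simp only [PySem.Set.discard, List.filter_filter, List.filter_cons, List.contains_cons]
  by_cases h : c ∈ seen <;>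
    simp [h] <;> exact List.filter_congr fun x _ => Bool.and_comm _ _

-- A's loop, with `seen` the set of all elements already scanned: `checked` holds
-- exactly the already-seen values of count 3, and the remaining output is the
-- not-yet-seen distinct elements filtered by pvSel.
lemma pv_key (all : List Int) : ∀ (rest : List Int) (sans : List (List Int)) (checked seen : List Int),
    (∀ x : Int, x ∈ checked ↔ (x ∈ seen ∧ all.count x = 3)) →
    (rest.foldl
      (fun (st : List (List Int) × List Int) c =>
        if all.count c == 3 && !(st.2.contains c)
        then (st.1 ++ [[c, c, c]], st.2 ++ [c])
        else st)
      (sans, checked)).1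
    = sans ++ ((PySem.Set.ofList rest).filter (fun y => !seen.contains y)).filterMap (pvSel all) := by
  intro rest
  induction rest with
  | nil => intro sans checked seen _; simp [PySem.Set.ofList]
  | cons c rest ih =>
    intro sans checked seen inv
    rw [List.foldl_cons, pv_filter_ofList_cons]
    by_cases h3 : all.count c = 3
    · by_cases hc : c ∈ checked
      · have hs : c ∈ seen := ((inv c).mp hc).1
        have hcond : (all.count c == 3 && !(checked.contains c)) = false := by simp [hc]
        rw [hcond]
        simp only [Bool.false_eq_true, if_false]
        rw [ih sans checked (c :: seen) ?_]
        · simp [hs]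
        · intro x
          rw [inv x]
          constructor
          · intro ⟨hx, hcx⟩; exact ⟨by simp [hx], hcx⟩
          · intro ⟨hx, hcx⟩
            rcases List.mem_cons.mp hx with rfl | hx'
            · exact ⟨hs, hcx⟩
            · exact ⟨hx', hcx⟩
      · have hs : c ∉ seen := fun hseen => hc ((inv c).mpr ⟨hseen, h3⟩)
        have hcond : (all.count c == 3 && !(checked.contains c)) = true := by simp [hc, h3]
        rw [hcond]
        simp only [if_true]
        rw [ih (sans ++ [[c, c, c]]) (checked ++ [c]) (c :: seen) ?_]
        · simp [hs, pvSel, h3]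
        · intro x
          simp only [List.mem_append, List.mem_cons, List.not_mem_nil, or_false, inv x]
          by_cases hxc : x = c
          · subst hxc; simp [h3]
          · simp [hxc]
    · have hcond : (all.count c == 3 && !(checked.contains c)) = false := by simp [h3]
      rw [hcond]
      simp only [Bool.false_eq_true, if_false]
      rw [ih sans checked (c :: seen) ?_]
      · by_cases hs : c ∈ seen
        · simp [hs]
        · simp [hs, pvSel, h3]
      · intro x
        rw [inv x]
        constructor
        · intro ⟨hx, hcx⟩; exact ⟨by simp [hx], hcx⟩
        · intro ⟨hx, hcx⟩
          rcases List.mem_cons.mp hx with rfl | hx'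
          · exact absurd hcx h3
          · exact ⟨hx', hcx⟩

-- B's dict is Counter(cards); its items are the distinct cards with their counts.
lemma pv_alt_eq (cards : List Int) :
    find_san_zhang_alt cards = (PySem.Set.ofList cards).filterMap (pvSel cards) := by
  unfold find_san_zhang_alt
  rw [PySem.Dict.foldl_insert_getD_add_one_eq_counter]
  dsimp only
  rw [PySem.Dict.items_counter]
  rw [List.filterMap_map]
  apply List.filterMap_congr
  intro x _
  simp only [Function.comp, pvSel]
  by_cases h : cards.count x = 3
  · simp [h]
  · have : ((cards.count x : Int)) ≠ 3 := by exact_mod_cast h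
    simp [h, this]

-- ===== VERDICT (by name: the statement is the Claim_ definition above) =====
theorem find_san_zhang_spec : Claim_equal_find_san_zhang := by
  intro cards _
  unfold Spec_find_san_zhang find_san_zhang
  rw [pv_alt_eq, pv_key cards cards [] [] [] (by simp)]
  simp
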